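-- pv_equiv track=rewrite | github.com/kimhyeongju/python_coding | 프로그래머스/1/140108. 문자열 나누기/문자열 나누기.py | solution
-- ===== SOURCE A (Python) =====
-- def solution(s):
--     answer = 0
--     i = 1
--     cntA = 1
--     cntB = 0
--     while len(s)>0:
--         if len(s) == 1:
--             answer += 1
--             break
--         else:
--             x = s[0]
--             if s[i] == x:
--                 cntA += 1
--                 i += 1
--             else:
--                 cntB += 1
--                 i += 1
--             if cntA > len(s)-cntA:
--                 answer += 1
--                 break
--             if cntA == cntB:
--                 answer += 1
--                 s = s[cntA+cntB:]
--                 i = 1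
--                 cntA = 1
--                 cntB = 0
--     return answer
-- ===== SOURCE B (Python) =====
-- def solution(s):
--     # Single linear pass with running same/diff counters; no slicing. Counts each chunk at its start.
--     answer = 0
--     same = 0
--     diff = 0
--     x = ''
--     for c in s:
--         if same == diff:
--             answer += 1
--             x = c
--             same, diff = 1, 0
--         elif c == x:
--             same += 1
--         else:
--             diff += 1
--     return answer
-- ===== Notes on version B (the rewrite author's own statement) =====
-- stated objective: faster
-- what changed: Replaces A's rescan-and-slice while loop (repeated slicing s = s[cntA+cntB:] with counters reset per chunk and an early break test) by a single linear pass over the characters with running same/diff counters that counts each chunk at its start and never slices.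
import Mathlib
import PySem

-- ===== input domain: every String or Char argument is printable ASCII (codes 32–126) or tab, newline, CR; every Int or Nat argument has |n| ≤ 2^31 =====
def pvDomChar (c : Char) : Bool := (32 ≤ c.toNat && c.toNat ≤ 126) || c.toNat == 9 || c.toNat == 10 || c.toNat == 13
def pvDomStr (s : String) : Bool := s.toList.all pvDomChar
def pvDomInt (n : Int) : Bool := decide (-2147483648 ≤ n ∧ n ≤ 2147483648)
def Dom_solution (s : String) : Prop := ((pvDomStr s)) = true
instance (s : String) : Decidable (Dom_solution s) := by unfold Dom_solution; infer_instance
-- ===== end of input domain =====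

-- B replaces A's quadratic rescan-and-slice loop by a single linear pass with running
-- same/diff counters that counts each chunk at its start (objective: faster).

-- ===== PORT A =====
-- A's while loop, step for step; fuel only makes the recursion total (one unit per
-- iteration; `solution` passes length+1, more than the loop can ever run, so the
-- fuel-0 branch is unreachable).  The `none` index case is Python's IndexError, which
-- A never reaches (cntB can never jump over cntA, so the loop always breaks in time).
def loopA : Nat → List Char → Int → Int → Int → Int → Int
  | 0, _, _, _, _, answer => answer
  | fuel + 1, s, i, cntA, cntB, answer =>
    if s.length = 0 then answer
    else if s.length = 1 then answer + 1
    else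
      match PySem.List.pyGet? s 0, PySem.List.pyGet? s i with
      | some x, some c =>
        if c = x then
          -- cntA += 1; i += 1; then the two checks
          if (s.length : Int) - (cntA + 1) < cntA + 1 then answer + 1
          else if cntA + 1 = cntB then
            loopA fuel (PySem.List.slice s (some ((cntA + 1) + cntB)) none) 1 1 0 (answer + 1)
          else loopA fuel s (i + 1) (cntA + 1) cntB answer
        else
          -- cntB += 1; i += 1; then the two checks
          if (s.length : Int) - cntA < cntA then answer + 1
          else if cntA = cntB + 1 then
            loopA fuel (PySem.List.slice s (some (cntA + (cntB + 1))) none) 1 1 0 (answer + 1)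
          else loopA fuel s (i + 1) cntA (cntB + 1) answer
      | _, _ => answer

def solution (s : String) : Int :=
  loopA (s.toList.length + 1) s.toList 1 1 0 0

-- ===== PORT B =====
-- Source B's for loop; the initial x is never compared (the same = diff branch fires
-- before any comparison), so Python's x = '' is rendered as an arbitrary Char ' '.
def loopB : List Char → Char → Int → Int → Int → Int
  | [], _, _, _, answer => answer
  | c :: rest, x, same, diff, answer =>
    if same = diff then loopB rest c 1 0 (answer + 1)
    else if c = x then loopB rest x (same + 1) diff answer
    else loopB rest x same (diff + 1) answer

def solution_alt (s : String) : Int := loopB s.toList ' ' 0 0 0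

-- ===== PRECONDITION & SPEC =====
def Spec_solution (s : String) (out : Int) : Prop := out = solution_alt s
instance (s : String) (out : Int) : Decidable (Spec_solution s out) := by unfold Spec_solution; infer_instance

-- ===== CLAIM (what is proved, stated in full; the proofs are below) =====
def Claim_equal_solution : Prop := ∀ (s : String), Dom_solution s → Spec_solution s (solution s)

-- ===== LEMMAS AND PROOFS =====

-- once diff can never catch same again, loopB just scans to the end
theorem loopB_stuck (rest : List Char) (x : Char) (same diff answer : Int)
    (h : diff + rest.length < same) : loopB rest x same diff answer = answer := by
  induction rest generalizing x same diff with
  | nil => rfl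
  | cons c r ih =>
    simp only [List.length_cons] at h
    rw [loopB, if_neg (by push_cast at h; omega : ¬ same = diff)]
    by_cases hc : c = x
    · rw [if_pos hc]; exact ih x (same + 1) diff (by push_cast at h ⊢; omega)
    · rw [if_neg hc]; exact ih x same (diff + 1) (by push_cast at h ⊢; omega)

-- the loop correspondence: A's state (s, j, cntA, cntB) mid-chunk matches B scanning
-- the suffix s.drop j with x = s[0] and the current chunk already counted (answer + 1)
theorem loopA_eq_loopB (fuel : Nat) (s : List Char) (j : Nat) (cntA cntB answer : Int)
    (h0 : 0 ≤ cntB) (hlt : cntB < cntA) (hsum : cntA + cntB = (j : Int))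
    (hj : j < s.length) (hfuel : s.length - j < fuel) :
    loopA fuel s (j : Int) cntA cntB answer
      = loopB (s.drop j) s.headI cntA cntB (answer + 1) := by
  induction fuel generalizing s j cntA cntB answer with
  | zero => omega
  | succ fuel ih =>
    have hj1 : 1 ≤ j := by omega
    have hlen : 2 ≤ s.length := by omega
    obtain ⟨x, s', rfl⟩ : ∃ x s', s = x :: s' := by
      cases s with
      | nil => simp at hlen
      | cons a t => exact ⟨a, t, rfl⟩
    simp only [List.headI]
    have hget0 : PySem.List.pyGet? (x :: s') (0 : Int) = some x := by
      simp [PySem.List.pyGet?, PySem.List.pyIdx?]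
    have hgetj : PySem.List.pyGet? (x :: s') ((j : Nat) : Int) = some ((x :: s')[j]) := by
      simp [PySem.List.pyGet?_natCast, List.getElem?_eq_getElem hj]
    have hdrop : (x :: s').drop j = (x :: s')[j] :: (x :: s').drop (j + 1) :=
      List.drop_eq_getElem_cons hj
    have hdlen : ((x :: s').drop (j + 1)).length = (x :: s').length - (j + 1) :=
      List.length_drop
    set c := (x :: s')[j] with hc
    have hxne : cntA ≠ cntB := by omega
    rw [loopA, if_neg (show ¬ ((x :: s').length = 0) by omega),
        if_neg (show ¬ ((x :: s').length = 1) by omega)]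
    simp only [hget0, hgetj]
    rw [hdrop, loopB, if_neg hxne]
    by_cases hcx : c = x
    · rw [if_pos hcx, if_pos hcx]
      by_cases hbrk : ((x :: s').length : Int) - (cntA + 1) < cntA + 1
      · rw [if_pos hbrk, loopB_stuck _ _ _ _ _ (by rw [hdlen]; omega)]
      · rw [if_neg hbrk, if_neg (show ¬ (cntA + 1 = cntB) by omega)]
        have hjlt : j + 1 < (x :: s').length := by omega
        have h2 := ih (x :: s') (j + 1) (cntA + 1) cntB answer h0 (by omega)
          (by push_cast; omega) hjlt (by omega)
        push_cast at h2
        simp only [List.headI] at h2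
        rw [h2]
    · rw [if_neg hcx, if_neg hcx]
      by_cases hbrk : ((x :: s').length : Int) - cntA < cntA
      · rw [if_pos hbrk, loopB_stuck _ _ _ _ _ (by rw [hdlen]; omega)]
      · rw [if_neg hbrk]
        by_cases hcut : cntA = cntB + 1
        · -- balance reached: A slices off the chunk, B hits same = diff next character
          rw [if_pos hcut]
          have hslice : PySem.List.slice (x :: s') (some (cntA + (cntB + 1))) none
              = (x :: s').drop (j + 1) := by
            have he : cntA + (cntB + 1) = ((j + 1 : Nat) : Int) := by push_cast; omega
            rw [he, PySem.List.slice_from_natCast]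
          rw [hslice]
          cases hrest : (x :: s').drop (j + 1) with
          | nil =>
            rw [loopB]
            have hf1 : 1 ≤ fuel := by
              have := congrArg List.length hrest
              rw [hdlen] at this; simp at this; omega
            obtain ⟨f, rfl⟩ := Nat.exists_eq_succ_of_ne_zero (by omega : fuel ≠ 0)
            rw [loopA]; simp
          | cons c2 r2 =>
            have hrl : (c2 :: r2).length = (x :: s').length - (j + 1) := by
              rw [← hrest, hdlen]
            rw [loopB, if_pos hcut]
            cases r2 with
            | nil =>
              have hf1 : 1 ≤ fuel := by simp only [List.length_cons] at hrl hfuel; omega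
              obtain ⟨f, rfl⟩ := Nat.exists_eq_succ_of_ne_zero (by omega : fuel ≠ 0)
              rw [loopA]; simp [loopB]
            | cons c3 r3 =>
              have h2 := ih (c2 :: c3 :: r3) 1 1 0 (answer + 1) (by omega) (by omega)
                (by norm_num) (by simp)
                (by simp only [List.length_cons] at hrl hfuel hj ⊢; omega)
              push_cast at h2
              simp only [List.headI, List.drop_succ_cons, List.drop_zero] at h2
              rw [h2]
        · rw [if_neg hcut]
          have hjlt : j + 1 < (x :: s').length := by omega
          have h2 := ih (x :: s') (j + 1) cntA (cntB + 1) answer (by omega) (by omega)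
            (by push_cast; omega) hjlt (by omega)
          push_cast at h2
          simp only [List.headI] at h2
          rw [h2]

-- ===== VERDICT (by name: the statement is the Claim_ definition above) =====
theorem solution_spec : Claim_equal_solution := by
  unfold Claim_equal_solution Spec_solution
  intro s _
  unfold solution solution_alt
  cases hs : s.toList with
  | nil => rfl
  | cons c rest =>
    cases rest with
    | nil => rfl
    | cons c2 r =>
      have h := loopA_eq_loopB ((c :: c2 :: r).length + 1) (c :: c2 :: r) 1 1 0 0
        (by omega) (by omega) (by norm_num) (by simp) (by omega)
      push_cast at h
      rw [h]
      simp only [List.headI, List.drop_succ_cons, List.drop_zero]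
      conv_rhs => rw [loopB]
      norm_num
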